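-- pv_equiv track=rewrite | github.com/Bobur-Boboyev/codewars | The Office VI - Sabbatical.py | sabb
-- ===== SOURCE A (Python) =====
-- def sabb(s, val, happiness):
--     v = 'sabbatical'
--     d = []
--     for i in s:
--         if i in v:
--             d.append(1)
--     s = sum(d)+val+happiness
--     if s > 22:
--         return "Sabbatical! Boom!"
--     else:
--         return "Back to your desk, boy."
-- ===== SOURCE B (Python) =====
-- def sabb(s, val, happiness):
--     # Build a frequency table in one pass, then sum the counts of the
--     # seven distinct letters of 'sabbatical' instead of testing each
--     # char of s for membership.
--     cnt = {}
--     for ch in s: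
--         cnt[ch] = cnt.get(ch, 0) + 1
--     total = sum(cnt.get(c, 0) for c in 'sabticl')
--     if total + val + happiness > 22:
--         return "Sabbatical! Boom!"
--     return "Back to your desk, boy."
-- ===== Notes on version B (the rewrite author's own statement) =====
-- stated objective: alternative
-- what changed: B builds a character frequency table of s in one pass and sums the counts of the seven distinct letters of 'sabbatical', instead of A's per-character membership test against the string and list of 1s.
import Mathlib
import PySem

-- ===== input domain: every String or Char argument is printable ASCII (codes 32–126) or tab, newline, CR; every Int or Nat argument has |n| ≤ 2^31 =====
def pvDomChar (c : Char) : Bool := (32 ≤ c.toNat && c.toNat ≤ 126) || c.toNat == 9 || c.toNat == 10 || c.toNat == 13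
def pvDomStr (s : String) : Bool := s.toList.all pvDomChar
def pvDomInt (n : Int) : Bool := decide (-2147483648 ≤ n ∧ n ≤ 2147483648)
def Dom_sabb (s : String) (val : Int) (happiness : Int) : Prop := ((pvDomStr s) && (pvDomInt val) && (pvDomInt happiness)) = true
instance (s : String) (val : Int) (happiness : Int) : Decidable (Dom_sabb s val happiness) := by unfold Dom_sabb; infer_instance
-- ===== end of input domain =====

-- B builds a frequency table of s and sums the counts of the distinct letters of 'sabbatical'
-- instead of A's per-character membership test (alternative decomposition, same cost).


-- ===== PORT A =====
-- 'i in v' for the single character i is exact as list membership in v's characters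
def sabb (s : String) (val : Int) (happiness : Int) : String :=
  let v : String := "sabbatical"
  let d : List Int := s.toList.foldl (fun d i => if v.toList.contains i then d ++ [1] else d) []
  let s2 : Int := d.sum + val + happiness
  if s2 > 22 then "Sabbatical! Boom!" else "Back to your desk, boy."

-- ===== PORT B =====
def sabb_alt (s : String) (val : Int) (happiness : Int) : String :=
  let cnt : PySem.Dict Char Int :=
    s.toList.foldl (fun d ch => d.insert ch (d.getD ch 0 + 1)) PySem.Dict.empty
  let total : Int := "sabticl".toList.foldl (fun acc c => acc + cnt.getD c 0) 0
  if total + val + happiness > 22 then "Sabbatical! Boom!" else "Back to your desk, boy."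

-- ===== PRECONDITION & SPEC =====
def Spec_sabb (s : String) (val : Int) (happiness : Int) (out : String) : Prop := out = sabb_alt s val happiness
instance (s : String) (val : Int) (happiness : Int) (out : String) : Decidable (Spec_sabb s val happiness out) := by unfold Spec_sabb; infer_instance

-- ===== CLAIM (what is proved, stated in full; the proofs are below) =====
def Claim_equal_sabb : Prop := ∀ (s : String) (val : Int) (happiness : Int), Dom_sabb s val happiness → Spec_sabb s val happiness (sabb s val happiness)

-- ===== LEMMAS AND PROOFS =====

-- A's loop: the sum of the appended 1s is the number of chars satisfying the test
lemma sumA (p : Char → Bool) (xs : List Char) (acc : List Int) :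
    (xs.foldl (fun d i => if p i then d ++ [1] else d) acc).sum
      = acc.sum + (xs.countP p : Int) := by
  induction xs generalizing acc with
  | nil => simp
  | cons x xs ih =>
    simp only [List.foldl_cons, List.countP_cons]
    by_cases h : p x = true
    · rw [ih]; simp [h]; ring
    · rw [ih]; simp [h]

-- splitting a membership countP at a fresh head letter
lemma countP_cons_letter (c : Char) (L : List Char) (hc : L.contains c = false)
    (xs : List Char) :
    xs.countP (fun i => (c :: L).contains i)
      = xs.count c + xs.countP (fun i => L.contains i) := by
  induction xs with
  | nil => simp
  | cons x xs ih =>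
    simp only [List.countP_cons, List.count_cons, ih]
    by_cases h : x = c
    · subst h
      have hx : x ∉ L := by simpa using hc
      simp [hx]
      omega
    · simp [h]
      omega

-- B's sum over distinct letters equals the membership count
lemma sumB (L : List Char) (hL : L.Nodup) (xs : List Char) (acc : Int) :
    L.foldl (fun acc c => acc + (xs.count c : Int)) acc
      = acc + (xs.countP (fun i => L.contains i) : Int) := by
  induction L generalizing acc with
  | nil => simp
  | cons c L ih =>
    have hc : L.contains c = false := by
      simpa using (List.nodup_cons.mp hL).1
    rw [List.foldl_cons, ih (List.nodup_cons.mp hL).2,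
        countP_cons_letter c L hc xs]
    push_cast; ring

lemma mem_letters (i : Char) :
    "sabbatical".toList.contains i = "sabticl".toList.contains i := by
  have h1 : "sabbatical".toList = ['s','a','b','b','a','t','i','c','a','l'] := rfl
  have h2 : "sabticl".toList = ['s','a','b','t','i','c','l'] := rfl
  rw [h1, h2]
  simp only [List.contains_cons, List.contains_nil]
  by_cases hs : i == 's' <;> by_cases ha : i == 'a' <;> by_cases hb : i == 'b' <;>
    by_cases ht : i == 't' <;> simp [hs, ha, hb, ht]

-- ===== VERDICT (by name: the statement is the Claim_ definition above) =====
theorem sabb_spec : Claim_equal_sabb := by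
  intro s val happiness _
  show sabb s val happiness = sabb_alt s val happiness
  unfold sabb sabb_alt
  have hcnt : ∀ c : Char,
      (s.toList.foldl (fun d ch => d.insert ch (d.getD ch 0 + 1)) PySem.Dict.empty).getD c 0
        = (s.toList.count c : Int) := by
    intro c
    rw [PySem.Dict.getD_foldl_insert_add_one]
    simp
  simp only [hcnt]
  have h7 : "sabticl".toList = ['s','a','b','t','i','c','l'] := rfl
  rw [sumA, h7, sumB ['s','a','b','t','i','c','l'] (by decide) s.toList 0]
  have : (List.countP (fun i => "sabbatical".toList.contains i) s.toList)
      = (List.countP (fun i => (['s','a','b','t','i','c','l'] : List Char).contains i) s.toList) := by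
    apply List.countP_congr
    intro x _
    rw [show (['s','a','b','t','i','c','l'] : List Char) = "sabticl".toList from rfl, mem_letters x]
  rw [this]
  simp
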